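-- pv_equiv track=rewrite | github.com/JZ-LIANG/CRF-LSTM-NER | utils.py | pad_word
-- ===== SOURCE A (Python) =====
-- def pad_word(batch_setence_word):
--     '''
--     https://guillaumegenthial.github.io/sequence-tagging-with-tensorflow.html
--     '''
--     max_length_word = max([max(map(lambda x: len(x), seq))
--                            for seq in batch_setence_word])
--     sequence_padded, sequence_length = [], []
--     for seq in batch_setence_word:
--         # all words are same length now
--         sp, sl = _pad_sequences(seq, 0, max_length_word)
--         sequence_padded += [sp]
--         sequence_length += [sl]
--
--     max_length_sentence = max(map(lambda x : len(x), batch_setence_word))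
--     sequence_padded, _ = _pad_sequences(sequence_padded,
--             [0]*max_length_word, max_length_sentence)
--     sequence_length, _ = _pad_sequences(sequence_length, 0,
--             max_length_sentence)
--
--     return sequence_padded, sequence_length
--
-- def _pad_sequences(sequences, pad_tok, max_length):
--     sequence_padded, sequence_length = [], []
--
--     for seq in sequences:
--         seq = list(seq)
--         seq_ = seq[:max_length] + [pad_tok]*max(max_length - len(seq), 0)
--         sequence_padded +=  [seq_]
--         sequence_length += [min(len(seq), max_length)]
--
--     return sequence_padded, sequence_length
-- ===== SOURCE B (Python) =====
-- def pad_word(batch_setence_word):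
--     max_length_sentence = max(len(seq) for seq in batch_setence_word)
--     max_length_word = max(max(len(w) for w in seq) for seq in batch_setence_word)
--     sequence_padded = [
--         [[seq[i][j] if i < len(seq) and j < len(seq[i]) else 0
--           for j in range(max_length_word)]
--          for i in range(max_length_sentence)]
--         for seq in batch_setence_word]
--     sequence_length = [
--         [len(seq[i]) if i < len(seq) else 0 for i in range(max_length_sentence)]
--         for seq in batch_setence_word]
--     return sequence_padded, sequence_length
-- ===== Notes on version B (the rewrite author's own statement) =====
-- stated objective: alternative
-- what changed: Instead of A's two-stage pad-then-pad pipeline that appends padding tokens to existing lists via the _pad_sequences accumulator helper, B computes both maxima up front and fills the fixed-shape output grid by bounds-checked indexing: every cell (s,i,j) of the result is produced by iterating over range(max_length_sentence) x range(max_length_word) and fetching seq[i][j] when it exists, 0 otherwise.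
import Mathlib
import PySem

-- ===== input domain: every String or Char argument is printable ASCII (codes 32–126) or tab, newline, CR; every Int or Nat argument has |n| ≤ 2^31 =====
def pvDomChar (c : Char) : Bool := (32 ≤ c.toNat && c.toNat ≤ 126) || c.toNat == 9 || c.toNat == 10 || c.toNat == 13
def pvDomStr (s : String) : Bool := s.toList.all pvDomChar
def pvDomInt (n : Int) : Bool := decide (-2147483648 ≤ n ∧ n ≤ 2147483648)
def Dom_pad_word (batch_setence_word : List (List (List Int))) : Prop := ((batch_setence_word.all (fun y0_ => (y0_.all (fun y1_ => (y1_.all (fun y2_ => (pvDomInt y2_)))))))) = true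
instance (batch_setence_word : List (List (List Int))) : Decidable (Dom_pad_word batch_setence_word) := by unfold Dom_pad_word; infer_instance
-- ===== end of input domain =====

-- B replaces A's two-stage append-padding pipeline (_pad_sequences helper) by a direct
-- fill of the fixed-shape output grid via bounds-checked indexing over both ranges.

-- ===== PORT A =====
-- helper _pad_sequences, generic in the element type (used with Int and with List Int)
def padSeqsA {α : Type} (sequences : List (List α)) (pad_tok : α) (max_length : Int) :
    List (List α) × List Int :=
  sequences.foldl
    (fun acc seq =>
      (acc.1 ++ [PySem.List.slice seq none (some max_length) ++
                   List.replicate (max (max_length - (seq.length : Int)) 0).toNat pad_tok],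
       acc.2 ++ [min (seq.length : Int) max_length]))
    ([], [])

def pad_word (batch_setence_word : List (List (List Int))) :
    List (List (List Int)) × List (List Int) :=
  let max_length_word : Int :=
    (PySem.List.max?
      (batch_setence_word.map (fun seq =>
        (PySem.List.max? (seq.map (fun w => (w.length : Int))) (fun y => y)).getD 0))
      (fun y => y)).getD 0
  let sp_sl :=
    batch_setence_word.foldl
      (fun acc seq =>
        (acc.1 ++ [(padSeqsA seq 0 max_length_word).1],
         acc.2 ++ [(padSeqsA seq 0 max_length_word).2]))
      ([], [])
  let max_length_sentence : Int :=
    (PySem.List.max? (batch_setence_word.map (fun s => (s.length : Int))) (fun y => y)).getD 0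
  ((padSeqsA sp_sl.1 (List.replicate max_length_word.toNat 0) max_length_sentence).1,
   (padSeqsA sp_sl.2 0 max_length_sentence).1)

-- ===== PORT B =====
def pad_word_alt (batch_setence_word : List (List (List Int))) :
    List (List (List Int)) × List (List Int) :=
  let max_length_sentence : Int :=
    (PySem.List.max? (batch_setence_word.map (fun s => (s.length : Int))) (fun y => y)).getD 0
  let max_length_word : Int :=
    (PySem.List.max?
      (batch_setence_word.map (fun seq =>
        (PySem.List.max? (seq.map (fun w => (w.length : Int))) (fun y => y)).getD 0))
      (fun y => y)).getD 0
  (batch_setence_word.map (fun seq =>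
      (PySem.List.pyRange 0 max_length_sentence 1).map (fun i =>
        (PySem.List.pyRange 0 max_length_word 1).map (fun j =>
          if i < (seq.length : Int) ∧ j < ((PySem.List.pyGetD seq i []).length : Int)
          then PySem.List.pyGetD (PySem.List.pyGetD seq i []) j 0 else 0))),
   batch_setence_word.map (fun seq =>
      (PySem.List.pyRange 0 max_length_sentence 1).map (fun i =>
        if i < (seq.length : Int) then ((PySem.List.pyGetD seq i []).length : Int) else 0)))

-- ===== PRECONDITION & SPEC =====
-- Pre_ excludes exactly the inputs where A raises ValueError (max() of an empty
-- iterable): the empty batch and batches containing an empty sentence.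
def Pre_pad_word (batch_setence_word : List (List (List Int))) : Prop :=
  batch_setence_word ≠ [] ∧ ∀ seq ∈ batch_setence_word, seq ≠ []
instance (batch_setence_word : List (List (List Int))) : Decidable (Pre_pad_word batch_setence_word) := by unfold Pre_pad_word; infer_instance

def pvWitness_pad_word : List (List (List Int)) := [[[1, 2], [3]], [[4]]]

def Spec_pad_word (batch_setence_word : List (List (List Int))) (out : List (List (List Int)) × List (List Int)) : Prop := out = pad_word_alt batch_setence_word
instance (batch_setence_word : List (List (List Int))) (out : List (List (List Int)) × List (List Int)) : Decidable (Spec_pad_word batch_setence_word out) := by unfold Spec_pad_word; infer_instance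

-- ===== CLAIM (what is proved, stated in full; the proofs are below) =====
def Claim_equal_pad_word : Prop := ∀ (batch_setence_word : List (List (List Int))), Dom_pad_word batch_setence_word → Pre_pad_word batch_setence_word → Spec_pad_word batch_setence_word (pad_word batch_setence_word)

-- ===== LEMMAS AND PROOFS =====

lemma foldl_pair_map {α β γ : Type} (f : α → β) (g : α → γ) (l : List α)
    (a : List β) (b : List γ) :
    l.foldl (fun acc x => (acc.1 ++ [f x], acc.2 ++ [g x])) (a, b) =
      (a ++ l.map f, b ++ l.map g) := by
  induction l generalizing a b with
  | nil => simp
  | cons x t ih => simp [List.foldl_cons, ih]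

lemma getD_max_isMax {xs : List Int} {y : Int} (hy : y ∈ xs) :
    y ≤ (PySem.List.max? xs (fun v => v)).getD 0 := by
  cases h : PySem.List.max? xs (fun v => v) with
  | none =>
      have hnil : xs = [] := (PySem.List.max?_eq_none_iff _ _).mp h
      subst hnil; cases hy
  | some m => simpa using PySem.List.max?_isMax h y hy

lemma padSeqsA_eq {α : Type} (sequences : List (List α)) (pad : α) (ml : Int)
    (h0 : 0 ≤ ml) (h : ∀ s ∈ sequences, (s.length : Int) ≤ ml) :
    padSeqsA sequences pad ml =
      (sequences.map (fun s => s ++ List.replicate (ml - (s.length : Int)).toNat pad),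
       sequences.map (fun s => (s.length : Int))) := by
  unfold padSeqsA
  rw [foldl_pair_map]
  refine Prod.ext ?_ ?_ <;> simp only [List.nil_append]
  · refine List.map_congr_left (fun s hs => ?_)
    have hle := h s hs
    rw [PySem.List.slice_to _ h0, List.take_of_length_le (by omega),
      max_eq_left (by omega : (0:Int) ≤ ml - (s.length : Int))]
  · exact List.map_congr_left (fun s hs => min_eq_left (h s hs))

-- filling a length-n row by bounds-checked indexing = the list followed by padding
lemma build_row {α β : Type} (l : List α) (f : α → β) (d : β) (dflt : α) (n : Int)
    (h : (l.length : Int) ≤ n) :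
    (PySem.List.pyRange 0 n 1).map
      (fun i => if i < (l.length : Int) then f (PySem.List.pyGetD l i dflt) else d)
      = l.map f ++ List.replicate (n - (l.length : Int)).toNat d := by
  rw [PySem.List.pyRange_one, List.map_map]
  apply List.ext_getElem
  · simp; omega
  · intro k hk1 hk2
    simp only [List.getElem_map, List.getElem_range, Function.comp_apply, zero_add]
    by_cases hkl : k < l.length
    · rw [if_pos (by exact_mod_cast hkl)]
      rw [PySem.List.pyGetD_natCast, List.getD_eq_getElem l dflt hkl,
        List.getElem_append_left (by simpa using hkl), List.getElem_map]
    · rw [if_neg (by exact_mod_cast hkl)]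
      rw [List.getElem_append_right (by simpa using hkl), List.getElem_replicate]

lemma map_const_pyRange {β : Type} (n : Int) (c : β) :
    (PySem.List.pyRange 0 n 1).map (fun _ => c) = List.replicate n.toNat c := by
  rw [List.map_const']
  simp [PySem.List.length_pyRange_one]

theorem pad_word_eq (batch : List (List (List Int))) (hp : Pre_pad_word batch) :
    pad_word batch = pad_word_alt batch := by
  obtain ⟨hne, hseq⟩ := hp
  simp only [pad_word, pad_word_alt]
  set mw : Int :=
    (PySem.List.max?
      (batch.map (fun seq =>
        (PySem.List.max? (seq.map (fun w => (w.length : Int))) (fun y => y)).getD 0))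
      (fun y => y)).getD 0 with hmw
  set ms : Int :=
    (PySem.List.max? (batch.map (fun s => (s.length : Int))) (fun y => y)).getD 0 with hms
  -- every word length is ≤ mw
  have hw : ∀ seq ∈ batch, ∀ w ∈ seq, (w.length : Int) ≤ mw := by
    intro seq hsq w hwm
    have h1 : (w.length : Int) ≤
        (PySem.List.max? (seq.map (fun w => (w.length : Int))) (fun y => y)).getD 0 :=
      getD_max_isMax (List.mem_map_of_mem hwm)
    exact le_trans h1 (getD_max_isMax (List.mem_map_of_mem hsq))
  -- every sentence length is ≤ ms
  have hs : ∀ seq ∈ batch, (seq.length : Int) ≤ ms :=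
    fun seq hsq => getD_max_isMax (List.mem_map_of_mem hsq)
  -- the maxima are nonnegative
  obtain ⟨seq0, hseq0⟩ := List.exists_mem_of_ne_nil batch hne
  obtain ⟨w0, hw0⟩ := List.exists_mem_of_ne_nil seq0 (hseq seq0 hseq0)
  have hmw0 : 0 ≤ mw := le_trans (by positivity) (hw seq0 hseq0 w0 hw0)
  have hms0 : 0 ≤ ms := le_trans (by positivity) (hs seq0 hseq0)
  -- A: collapse the inner fold into two maps
  rw [foldl_pair_map (fun s => (padSeqsA s 0 mw).1) (fun s => (padSeqsA s 0 mw).2) batch [] []]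
  simp only [List.nil_append]
  have hinner : ∀ seq ∈ batch,
      padSeqsA seq 0 mw =
        (seq.map (fun w => w ++ List.replicate (mw - (w.length : Int)).toNat 0),
         seq.map (fun w => (w.length : Int))) :=
    fun seq hsq => padSeqsA_eq seq 0 mw hmw0 (hw seq hsq)
  rw [List.map_congr_left (fun s hsq => congrArg Prod.fst (hinner s hsq)),
      List.map_congr_left (fun s hsq => congrArg Prod.snd (hinner s hsq))]
  rw [padSeqsA_eq _ _ ms hms0 (by
        intro s hsm
        obtain ⟨seq, hsq, rfl⟩ := List.mem_map.mp hsm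
        simpa using hs seq hsq),
      padSeqsA_eq _ _ ms hms0 (by
        intro s hsm
        obtain ⟨seq, hsq, rfl⟩ := List.mem_map.mp hsm
        simpa using hs seq hsq)]
  simp only [List.map_map]
  -- B: turn each grid fill into maps-plus-padding
  refine Prod.ext ?_ ?_ <;> simp only
  · refine (List.map_congr_left (fun seq hsq => ?_)).symm
    have hrow : ∀ i ∈ PySem.List.pyRange 0 ms 1,
        (PySem.List.pyRange 0 mw 1).map (fun j =>
          if i < (seq.length : Int) ∧ j < ((PySem.List.pyGetD seq i []).length : Int)
          then PySem.List.pyGetD (PySem.List.pyGetD seq i []) j 0 else 0)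
        = (fun i => if i < (seq.length : Int)
            then (fun w => w ++ List.replicate (mw - (w.length : Int)).toNat 0)
                   (PySem.List.pyGetD seq i [])
            else List.replicate mw.toNat 0) i := by
      intro i him
      have hi0 : 0 ≤ i := ((PySem.List.mem_pyRange_one).mp him).1
      by_cases hi : i < (seq.length : Int)
      · simp only [hi, true_and, if_pos]
        set w := PySem.List.pyGetD seq i [] with hwdef
        have hwm : w ∈ seq := by
          have hlt : i.toNat < seq.length := by omega
          rw [hwdef, show i = ((i.toNat : Nat) : Int) from (Int.toNat_of_nonneg hi0).symm,
            PySem.List.pyGetD_natCast, List.getD_eq_getElem seq [] hlt]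
          exact List.getElem_mem hlt
        have := build_row w (fun x => x) (0:Int) (0:Int) mw (hw seq hsq w hwm)
        simpa using this
      · simp only [hi, false_and, if_neg, not_false_iff]
        rw [map_const_pyRange]
    rw [List.map_congr_left hrow,
      build_row seq (fun w => w ++ List.replicate (mw - (w.length : Int)).toNat 0)
        (List.replicate mw.toNat 0) [] ms (hs seq hsq)]
    simp
  · refine (List.map_congr_left (fun seq hsq => ?_)).symm
    rw [build_row seq (fun w : List Int => ((w.length : Int))) (0:Int) [] ms (hs seq hsq)]
    simp

-- ===== VERDICT (by name: the statement is the Claim_ definition above) =====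
theorem pad_word_spec : Claim_equal_pad_word := by
  intro batch _ hp
  unfold Spec_pad_word
  exact pad_word_eq batch hp
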